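-- pv_equiv track=rewrite | github.com/twardoch/midjargon | src/midjargon/core/parameters.py | _split_param_chunks
-- ===== SOURCE A (Python) =====
-- def _split_param_chunks(param_str: str) -> list[str]:
--     """
--     Split parameter string into chunks, preserving quoted values.
--
--     Args:
--         param_str: Parameter string to split.
--
--     Returns:
--         List of parameter chunks.
--
--     Raises:
--         ValueError: If parameter string has invalid syntax.
--     """
--     if not param_str:
--         return []
--
--     # Handle empty parameter case
--     if param_str == "--":
--         msg = "Empty parameter name"
--         raise ValueError(msg)
--
--     chunks = []
--     current_chunk = []
--     in_quotes = False
--     quote_char = None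
--     current_param = None
--
--     for char in param_str:
--         if char in {'"', "'"}:
--             if not in_quotes:
--                 in_quotes = True
--                 quote_char = char
--             elif char == quote_char:
--                 in_quotes = False
--                 quote_char = None
--             current_chunk.append(char)
--         elif char.isspace() and not in_quotes:
--             if current_chunk:
--                 chunk_str = "".join(current_chunk)
--                 if chunk_str.startswith("--"):
--                     if current_param:
--                         chunks.append(current_param)
--                     current_param = chunk_str
--                 elif current_param:
--                     current_param = f"{current_param} {chunk_str}"
--                 else:
--                     current_param = chunk_str
--                 current_chunk = []
--         else:
--             current_chunk.append(char)
--
--     # Handle last chunk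
--     if current_chunk:
--         chunk_str = "".join(current_chunk)
--         if chunk_str.startswith("--"):
--             if current_param:
--                 chunks.append(current_param)
--             current_param = chunk_str
--         elif current_param:
--             current_param = f"{current_param} {chunk_str}"
--         else:
--             current_param = chunk_str
--
--     if current_param:
--         chunks.append(current_param)
--
--     return chunks
-- ===== SOURCE B (Python) =====
-- def _split_param_chunks(param_str: str) -> list[str]:
--     """Two-pass version: quote-aware tokenizer, then a grouping pass over the tokens."""
--     if not param_str:
--         return []
--     if param_str == "--":
--         raise ValueError("Empty parameter name")
--
--     # Pass 1: split into tokens on unquoted whitespace, keeping quote chars.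
--     tokens = []
--     buf = ""
--     quote = None
--     for ch in param_str:
--         if ch in '"\'':
--             if quote is None:
--                 quote = ch
--             elif ch == quote:
--                 quote = None
--             buf += ch
--         elif ch.isspace() and quote is None:
--             if buf:
--                 tokens.append(buf)
--                 buf = ""
--         else:
--             buf += ch
--     if buf:
--         tokens.append(buf)
--
--     # Pass 2: group tokens into parameters at '--'-prefixed tokens.
--     chunks = []
--     current = None
--     for tok in tokens:
--         if tok.startswith("--"):
--             if current is not None:
--                 chunks.append(current)
--             current = tok
--         elif current is not None:
--             current = current + " " + tok
--         else:
--             current = tok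
--     if current is not None:
--         chunks.append(current)
--     return chunks
-- ===== Notes on version B (the rewrite author's own statement) =====
-- stated objective: simpler
-- what changed: A fuses tokenizing and grouping into one character loop with five pieces of state; B decomposes it into a quote-aware tokenizer pass followed by a separate grouping pass over the token list.
import Mathlib
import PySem

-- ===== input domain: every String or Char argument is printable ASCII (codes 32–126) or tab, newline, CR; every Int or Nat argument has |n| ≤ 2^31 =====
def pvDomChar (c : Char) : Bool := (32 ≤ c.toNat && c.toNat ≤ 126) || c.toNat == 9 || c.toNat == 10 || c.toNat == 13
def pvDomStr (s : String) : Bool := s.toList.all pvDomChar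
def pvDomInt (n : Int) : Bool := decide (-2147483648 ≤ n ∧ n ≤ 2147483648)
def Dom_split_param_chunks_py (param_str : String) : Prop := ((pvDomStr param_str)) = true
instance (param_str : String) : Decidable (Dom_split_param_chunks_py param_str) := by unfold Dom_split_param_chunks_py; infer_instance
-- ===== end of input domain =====

-- B changes only the decomposition: one fused char loop in A becomes a tokenizer pass then a grouping pass.
-- ===== PORT A =====
-- state: (chunks, current_chunk, in_quotes, quote_char, current_param); current_param is never some "" so
-- Python's truthiness test on it is ported as the Option pattern match.
def pyAStep (st : List String × List Char × Bool × Option Char × Option String) (c : Char) :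
    List String × List Char × Bool × Option Char × Option String :=
  let (chunks, cur, inq, qc, cp) := st
  if c = '"' ∨ c = '\'' then
    if !inq then (chunks, cur ++ [c], true, some c, cp)
    else if some c = qc then (chunks, cur ++ [c], false, none, cp)
    else (chunks, cur ++ [c], inq, qc, cp)
  else if PySem.Chars.isspace c && !inq then
    if cur ≠ [] then
      let t := String.mk cur
      if PySem.Str.startswith t "--" then
        match cp with
        | some p => (chunks ++ [p], [], inq, qc, some t)
        | none => (chunks, [], inq, qc, some t)
      else
        match cp with
        | some p => (chunks, [], inq, qc, some (p ++ " " ++ t))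
        | none => (chunks, [], inq, qc, some t)
    else st
  else (chunks, cur ++ [c], inq, qc, cp)

-- Python's trailing "handle last chunk" + final append (the chunk-handling code is duplicated there, as in A).
def pyAFin (st : List String × List Char × Bool × Option Char × Option String) : List String :=
  let (chunks, cur, _inq, _qc, cp) := st
  let (chunks, cp) :=
    if cur ≠ [] then
      let t := String.mk cur
      if PySem.Str.startswith t "--" then
        match cp with
        | some p => (chunks ++ [p], some t)
        | none => (chunks, some t)
      else
        match cp with
        | some p => (chunks, some (p ++ " " ++ t))
        | none => (chunks, some t)
    else (chunks, cp)
  match cp with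
  | some p => chunks ++ [p]
  | none => chunks

-- A raises ValueError on "--"; that input is excluded by Pre_ and the port returns [] there.
def split_param_chunks_py (param_str : String) : List String :=
  if param_str = "" then []
  else if param_str = "--" then []
  else pyAFin (param_str.toList.foldl pyAStep ([], [], false, none, none))

-- ===== PORT B =====
def pyTokStep (st : List String × List Char × Option Char) (c : Char) :
    List String × List Char × Option Char :=
  let (toks, buf, quote) := st
  if c = '"' ∨ c = '\'' then
    let quote' :=
      match quote with
      | none => some c
      | some q => if c = q then none else some q
    (toks, buf ++ [c], quote')
  else if PySem.Chars.isspace c && quote.isNone then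
    if buf ≠ [] then (toks ++ [String.mk buf], [], quote) else st
  else (toks, buf ++ [c], quote)

def pyGroupStep (st : List String × Option String) (tok : String) : List String × Option String :=
  let (chunks, cur) := st
  if PySem.Str.startswith tok "--" then
    match cur with
    | some p => (chunks ++ [p], some tok)
    | none => (chunks, some tok)
  else
    match cur with
    | some p => (chunks, some (p ++ " " ++ tok))
    | none => (chunks, some tok)

def split_param_chunks_py_alt (param_str : String) : List String :=
  if param_str = "" then []
  else if param_str = "--" then []
  else
    let (toks, buf, _) := param_str.toList.foldl pyTokStep ([], [], none)
    let toks := if buf ≠ [] then toks ++ [String.mk buf] else toks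
    let (chunks, cur) := toks.foldl pyGroupStep ([], none)
    match cur with
    | some p => chunks ++ [p]
    | none => chunks

-- ===== PRECONDITION & SPEC =====
-- A raises ValueError("Empty parameter name") exactly on param_str = "--"; excluded.
def Pre_split_param_chunks_py (param_str : String) : Prop := param_str ≠ "--"
instance (param_str : String) : Decidable (Pre_split_param_chunks_py param_str) := by
  unfold Pre_split_param_chunks_py; infer_instance

def pvWitness_split_param_chunks_py : String := "--ar 16:9 --style \"a b\" raw"

def Spec_split_param_chunks_py (param_str : String) (out : List String) : Prop :=
  out = split_param_chunks_py_alt param_str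
instance (param_str : String) (out : List String) : Decidable (Spec_split_param_chunks_py param_str out) := by
  unfold Spec_split_param_chunks_py; infer_instance

-- ===== CLAIM (what is proved, stated in full; the proofs are below) =====
def Claim_equal_split_param_chunks_py : Prop :=
  ∀ (param_str : String), Dom_split_param_chunks_py param_str →
    Pre_split_param_chunks_py param_str →
    Spec_split_param_chunks_py param_str (split_param_chunks_py param_str)

-- ===== LEMMAS AND PROOFS =====

-- the tokens B's first pass emits from here on, including the final buffer flush
def pvTokRec : List Char → List Char → Option Char → List String
  | [], cur, _ => if cur ≠ [] then [String.mk cur] else []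
  | c :: cs, cur, q =>
    if c = '"' ∨ c = '\'' then
      let q' :=
        match q with
        | none => some c
        | some qq => if c = qq then none else some qq
      pvTokRec cs (cur ++ [c]) q'
    else if PySem.Chars.isspace c && q.isNone then
      if cur ≠ [] then String.mk cur :: pvTokRec cs [] q else pvTokRec cs cur q
    else pvTokRec cs (cur ++ [c]) q

def pvGFin (st : List String × Option String) : List String :=
  match st.2 with
  | some p => st.1 ++ [p]
  | none => st.1

lemma tok_foldl_eq (cs : List Char) : ∀ (toks : List String) (cur : List Char) (q : Option Char),
    (if (cs.foldl pyTokStep (toks, cur, q)).2.1 ≠ [] then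
        (cs.foldl pyTokStep (toks, cur, q)).1 ++ [String.mk (cs.foldl pyTokStep (toks, cur, q)).2.1]
      else (cs.foldl pyTokStep (toks, cur, q)).1) = toks ++ pvTokRec cs cur q := by
  induction cs with
  | nil =>
      intro toks cur q
      simp only [List.foldl, pvTokRec]
      split <;> simp
  | cons c cs ih =>
      intro toks cur q
      simp only [List.foldl, pyTokStep, pvTokRec]
      by_cases hq : c = '"' ∨ c = '\''
      · simp only [hq, if_pos]
        exact ih toks (cur ++ [c]) _
      · simp only [hq, if_neg, if_false]
        by_cases hs : (PySem.Chars.isspace c && q.isNone) = true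
        · simp only [hs, if_pos]
          by_cases hc : cur = []
          · simp only [hc, ne_eq, not_true_eq_false, if_false, Bool.false_eq_true, ite_false]
            exact ih toks [] q
          · simp only [ne_eq, hc, not_false_eq_true, if_pos]
            rw [ih (toks ++ [String.mk cur]) [] q]
            simp
        · simp only [hs, if_false]
          exact ih toks (cur ++ [c]) q

lemma main_eq (cs : List Char) : ∀ (cur : List Char) (q : Option Char)
    (chunks : List String) (cp : Option String),
    pyAFin (cs.foldl pyAStep (chunks, cur, q.isSome, q, cp))
      = pvGFin ((pvTokRec cs cur q).foldl pyGroupStep (chunks, cp)) := by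
  induction cs with
  | nil =>
      intro cur q chunks cp
      simp only [List.foldl, pvTokRec, pyAFin, pvGFin]
      by_cases hc : cur = []
      · simp only [hc, ne_eq, not_true_eq_false, if_false, Bool.false_eq_true, ite_false,
          List.foldl]
      · simp only [ne_eq, hc, not_false_eq_true, if_pos, List.foldl, pyGroupStep]
  | cons c cs ih =>
      intro cur q chunks cp
      simp only [List.foldl, pyAStep, pvTokRec]
      by_cases hqc : c = '"' ∨ c = '\''
      · simp only [hqc, if_pos]
        cases q with
        | none => simpa using ih (cur ++ [c]) (some c) chunks cp
        | some qq =>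
            by_cases he : c = qq
            · subst he
              simpa using ih (cur ++ [c]) none chunks cp
            · have h1 : (some c = some qq) = False := by simp [he]
              simp only [Option.isSome_some, Bool.not_true, if_neg, h1, if_false, he,
                Bool.false_eq_true, ite_false]
              simpa using ih (cur ++ [c]) (some qq) chunks cp
      · simp only [hqc, if_neg, if_false]
        by_cases hs : (PySem.Chars.isspace c && !q.isSome) = true
        · have hs' : (PySem.Chars.isspace c && q.isNone) = true := by
            cases q <;> simpa using hs
          simp only [hs, if_pos, hs', if_pos]
          by_cases hc : cur = []
          · simp only [hc, ne_eq, not_true_eq_false, if_false, Bool.false_eq_true, ite_false]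
            exact ih [] q chunks cp
          · simp only [ne_eq, hc, not_false_eq_true, if_pos, List.foldl, pyGroupStep]
            cases cp with
            | none =>
                split
                · exact ih [] q chunks (some (String.mk cur))
                · exact ih [] q chunks (some (String.mk cur))
            | some p =>
                split
                · exact ih [] q (chunks ++ [p]) (some (String.mk cur))
                · exact ih [] q chunks (some (p ++ " " ++ String.mk cur))
        · have hs' : (PySem.Chars.isspace c && q.isNone) = false := by
            cases q <;> simpa using hs
          simp only [hs, if_false, hs', Bool.false_eq_true, ite_false]
          exact ih (cur ++ [c]) q chunks cp

-- ===== VERDICT (by name: the statement is the Claim_ definition above) =====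
theorem split_param_chunks_py_spec : Claim_equal_split_param_chunks_py := by
  intro s _ _
  unfold Spec_split_param_chunks_py split_param_chunks_py split_param_chunks_py_alt
  by_cases h0 : s = ""
  · simp [h0]
  · by_cases h1 : s = "--"
    · simp [h0, h1]
    · simp only [h0, h1, if_neg, if_false]
      have ht := tok_foldl_eq s.toList [] [] none
      have hm := main_eq s.toList [] none [] none
      simp only [Option.isSome_none] at hm
      rw [hm]
      revert ht
      cases hfold : s.toList.foldl pyTokStep ([], [], none) with
      | mk ts rest =>
        cases rest with
        | mk buf q =>
          intro ht
          simp only at ht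
          rw [ht]
          simp [pvGFin]
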